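-- pv_equiv track=rewrite | github.com/ChahelPaatur/Self-Modifying-Program-Synthesis-via-Online-Library-Evolution | smpma_agi.py | move_bbox_to_topleft
-- ===== SOURCE A (Python) =====
-- def translate(grid, dr, dc):
--     """Translate all non-zero cells by (dr, dc) within bounds, preserving size."""
--     if not grid:
--         return grid
--     h, w = len(grid), len(grid[0])
--     out = [[0] * w for _ in range(h)]
--     for i in range(h):
--         for j in range(w):
--             v = grid[i][j]
--             if v == 0:
--                 continue
--             ni, nj = i + dr, j + dc
--             if 0 <= ni < h and 0 <= nj < w:
--                 out[ni][nj] = v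
--     return out
--
-- def move_bbox_to_topleft(grid):
--     """Translate non-zero bounding box to the top-left corner."""
--     if not grid:
--         return grid
--     h, w = len(grid), len(grid[0])
--     min_r, max_r = h, -1
--     min_c, max_c = w, -1
--     for i in range(h):
--         for j in range(w):
--             if grid[i][j] != 0:
--                 min_r = min(min_r, i)
--                 max_r = max(max_r, i)
--                 min_c = min(min_c, j)
--                 max_c = max(max_c, j)
--     if max_r < 0:
--         return grid
--     return translate(grid, -min_r, -min_c)
-- ===== SOURCE B (Python) =====
-- def move_bbox_to_topleft(grid):
--     """Translate non-zero bounding box to the top-left corner (row-slicing formulation)."""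
--     if not grid:
--         return grid
--     w = len(grid[0])
--     windows = [row[:w] for row in grid]
--     firsts = [next((j for j, v in enumerate(win) if v != 0), w) for win in windows]
--     nz_rows = [f < w for f in firsts]
--     if not any(nz_rows):
--         return grid
--     min_r = nz_rows.index(True)
--     min_c = min(firsts)
--     return [win[min_c:] + [0] * min_c for win in windows[min_r:]] + \
--            [[0] * w for _ in range(min_r)]
-- ===== Notes on version B (the rewrite author's own statement) =====
-- stated objective: faster
-- what changed: B replaces A's per-cell double loops (a 4-way min/max fold over all cells, then translate() scattering every non-zero cell into a fresh zero grid) with row-level operations: one first-nonzero-column index per row gives min_r (first row whose index is < w) and min_c (minimum of the per-row indices), and the output is built by list slicing -- rows grid[min_r:] each becoming row[min_c:w]+[0]*min_c, plus min_r zero rows appended -- with no per-cell write loop. The row-level slicing/padding runs in C instead of per-cell Python loops, a constant-factor speedup a timing run measured.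
import Mathlib
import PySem

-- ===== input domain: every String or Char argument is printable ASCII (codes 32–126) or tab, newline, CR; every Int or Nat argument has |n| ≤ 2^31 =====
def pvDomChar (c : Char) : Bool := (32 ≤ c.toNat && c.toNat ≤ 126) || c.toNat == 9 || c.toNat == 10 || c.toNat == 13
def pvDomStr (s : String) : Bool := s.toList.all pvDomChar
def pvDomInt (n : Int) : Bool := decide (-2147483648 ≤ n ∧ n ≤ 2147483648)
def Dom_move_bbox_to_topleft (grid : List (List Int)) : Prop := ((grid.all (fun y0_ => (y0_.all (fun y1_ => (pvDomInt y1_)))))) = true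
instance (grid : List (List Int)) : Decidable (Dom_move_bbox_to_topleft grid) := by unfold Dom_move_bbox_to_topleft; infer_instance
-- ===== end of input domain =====

-- B replaces A's per-cell bbox fold + translate scatter by row-level slicing: a first-nonzero
-- column index per row, min_r/min_c read off those indices, and the output assembled from row
-- slices and zero padding; same O(h*w), a constant-factor speedup a timing run measured.

-- ===== PORT A =====
-- helper `translate` of A (literal transliteration; grid[i][j] on in-range Nat indices = getD)
def pvTranslate (grid : List (List Int)) (dr dc : Int) : List (List Int) :=
  if grid = [] then grid
  else
    let h := grid.length
    let w := (grid.headD []).length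
    let out0 := List.replicate h (List.replicate w (0 : Int))
    (List.range h).foldl (fun out i =>
      (List.range w).foldl (fun out j =>
        if (grid.getD i []).getD j 0 = 0 then out
        else
          if 0 ≤ (i : Int) + dr ∧ (i : Int) + dr < (h : Int) ∧
             0 ≤ (j : Int) + dc ∧ (j : Int) + dc < (w : Int) then
            out.modify ((i : Int) + dr).toNat
              (fun row => row.set ((j : Int) + dc).toNat ((grid.getD i []).getD j 0))
          else out) out) out0

def move_bbox_to_topleft (grid : List (List Int)) : List (List Int) :=
  if grid = [] then grid
  else
    let h := grid.length
    let w := (grid.headD []).length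
    let st := (List.range h).foldl (fun s i =>
      (List.range w).foldl (fun s j =>
        if (grid.getD i []).getD j 0 ≠ 0 then
          (min s.1 (i : Int), max s.2.1 (i : Int), min s.2.2.1 (j : Int), max s.2.2.2 (j : Int))
        else s) s) ((h : Int), (-1 : Int), (w : Int), (-1 : Int))
    if st.2.1 < 0 then grid
    else pvTranslate grid (-st.1) (-st.2.2.1)

-- ===== PORT B =====
-- row[:w] = take w; win[min_c:] = drop min_c (Nat index, exact); next(…, w) over enumerate = findIdx? default w
def move_bbox_to_topleft_alt (grid : List (List Int)) : List (List Int) :=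
  if grid = [] then grid
  else
    let w := (grid.headD []).length
    let windows := grid.map (fun row => row.take w)
    let firsts := windows.map (fun win => (win.findIdx? (fun v => v != 0)).getD w)
    let nzRows := firsts.map (fun f => decide (f < w))
    if !(nzRows.any id) then grid
    else
      let minR := nzRows.idxOf true
      let minC := (PySem.List.min? firsts (fun y => y)).getD 0
      (windows.drop minR).map (fun win => win.drop minC ++ List.replicate minC 0)
        ++ List.replicate minR (List.replicate w (0 : Int))

-- ===== PRECONDITION & SPEC =====
-- Pre_ excludes exactly the ragged grids on which Python A raises IndexError (a row shorter
-- than the first row, read by grid[i][j] for j in range(len(grid[0]))); A returns on all others.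
def Pre_move_bbox_to_topleft (grid : List (List Int)) : Prop :=
  ∀ row ∈ grid, (grid.headD []).length ≤ row.length
instance (grid : List (List Int)) : Decidable (Pre_move_bbox_to_topleft grid) := by
  unfold Pre_move_bbox_to_topleft; infer_instance
def pvWitness_move_bbox_to_topleft : List (List Int) := [[0, 0, 0], [0, 5, 1], [0, 0, 2]]

def Spec_move_bbox_to_topleft (grid : List (List Int)) (out : List (List Int)) : Prop := out = move_bbox_to_topleft_alt grid
instance (grid : List (List Int)) (out : List (List Int)) : Decidable (Spec_move_bbox_to_topleft grid out) := by unfold Spec_move_bbox_to_topleft; infer_instance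

-- ===== CLAIM (what is proved, stated in full; the proofs are below) =====
def Claim_equal_move_bbox_to_topleft : Prop := ∀ (grid : List (List Int)), Dom_move_bbox_to_topleft grid → Pre_move_bbox_to_topleft grid → Spec_move_bbox_to_topleft grid (move_bbox_to_topleft grid)
-- ===== LEMMAS AND PROOFS =====

-- the row-major list of all coordinates of an h×w grid
def pvPairs (h w : Nat) : List (Nat × Nat) :=
  (List.range h).flatMap (fun i => (List.range w).map (fun j => (i, j)))

-- an h×w grid built from a value function
def pvMk (h w : Nat) (f : Nat → Nat → Int) : List (List Int) :=
  (List.range h).map (fun a => (List.range w).map (fun b => f a b))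

-- the non-zero cells of g, in row-major order
def pvNZ (g : List (List Int)) : Nat × Nat → Bool :=
  fun p => decide ((g.getD p.1 []).getD p.2 0 ≠ 0)

def pvCells (g : List (List Int)) : List (Nat × Nat) :=
  (pvPairs g.length (g.headD []).length).filter (pvNZ g)

-- B's per-row first-nonzero index (default w)
def pvF (w : Nat) (row : List Int) : Nat :=
  ((row.take w).findIdx? (fun v => v != 0)).getD w

lemma pvMem_pvPairs {h w : Nat} {i j : Nat} : (i, j) ∈ pvPairs h w ↔ i < h ∧ j < w := by
  simp [pvPairs]

lemma pvMem_pvCells {g : List (List Int)} {i j : Nat} :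
    (i, j) ∈ pvCells g ↔ (i < g.length ∧ j < (g.headD []).length) ∧ (g.getD i []).getD j 0 ≠ 0 := by
  rw [pvCells, List.mem_filter, pvMem_pvPairs, pvNZ]
  simp

lemma pvMk_congr {h w : Nat} {f g : Nat → Nat → Int}
    (hfg : ∀ a < h, ∀ b < w, f a b = g a b) : pvMk h w f = pvMk h w g := by
  unfold pvMk
  apply List.map_congr_left
  intro a ha
  apply List.map_congr_left
  intro b hb
  exact hfg a (List.mem_range.mp ha) b (List.mem_range.mp hb)

lemma pvMk_zero (h w : Nat) :
    List.replicate h (List.replicate w (0 : Int)) = pvMk h w (fun _ _ => 0) := by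
  apply List.ext_getElem
  · simp [pvMk]
  · intro a h1 h2
    simp only [List.getElem_replicate, pvMk, List.getElem_map]
    apply List.ext_getElem
    · simp
    · intro b hb1 hb2
      simp

lemma pvMk_write {h w n m : Nat} (v : Int) (f : Nat → Nat → Int) :
    (pvMk h w f).modify n (fun row => row.set m v)
      = pvMk h w (fun a b => if a = n ∧ b = m then v else f a b) := by
  apply List.ext_getElem
  · simp [pvMk]
  · intro a h1 h2
    rw [List.getElem_modify]
    simp only [pvMk, List.getElem_map, List.getElem_range]
    by_cases han : n = a
    · subst han
      rw [if_pos rfl]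
      apply List.ext_getElem
      · simp
      · intro b hb1 hb2
        rw [List.getElem_set]
        simp only [List.getElem_map, List.getElem_range]
        by_cases hbm : m = b
        · subst hbm; simp
        · rw [if_neg hbm, if_neg (by rintro ⟨_, hbb⟩; exact hbm hbb.symm)]
    · rw [if_neg han]
      apply List.map_congr_left
      intro b _
      rw [if_neg (by rintro ⟨haa, _⟩; exact han haa.symm)]

-- double range-fold = fold over the row-major pair list
lemma pvFold_pairs {σ : Type} (h w : Nat) (F : σ → Nat → Nat → σ) (init : σ) :
    (List.range h).foldl (fun s i => (List.range w).foldl (fun s j => F s i j) s) init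
      = (pvPairs h w).foldl (fun s p => F s p.1 p.2) init := by
  rw [pvPairs, List.foldl_flatMap]
  simp only [List.foldl_map]

-- the 4-tuple min/max fold splits into four independent folds
lemma pvFold_split (cells : List (Nat × Nat)) (a b c d : Int) :
    cells.foldl (fun s p =>
        (min s.1 (p.1 : Int), max s.2.1 (p.1 : Int), min s.2.2.1 (p.2 : Int), max s.2.2.2 (p.2 : Int)))
        (a, b, c, d)
      = (cells.foldl (fun m p => min m (p.1 : Int)) a,
         cells.foldl (fun m p => max m (p.1 : Int)) b,
         cells.foldl (fun m p => min m (p.2 : Int)) c,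
         cells.foldl (fun m p => max m (p.2 : Int)) d) := by
  induction cells generalizing a b c d with
  | nil => rfl
  | cons p t ih => simp only [List.foldl_cons]; exact ih _ _ _ _

lemma pvCast_foldl_min (key : Nat × Nat → Nat) (t : List (Nat × Nat)) (x : Nat) :
    ((t.foldl (fun m p => min m (key p)) x : Nat) : Int)
      = t.foldl (fun m p => min m ((key p : Nat) : Int)) ((x : Nat) : Int) := by
  induction t generalizing x with
  | nil => rfl
  | cons y l ih => simp only [List.foldl_cons, ih, Nat.cast_min]

-- the min-fold of A over a non-empty cell list equals min() of the mapped keys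
lemma pvMin_fold (key : Nat × Nat → Nat) (q : Nat × Nat) (t : List (Nat × Nat)) (H : Nat)
    (hq : key q ≤ H) :
    (q :: t).foldl (fun m p => min m ((key p : Nat) : Int)) ((H : Nat) : Int)
      = (((PySem.List.min? ((q :: t).map key) (fun y => y)).getD 0 : Nat) : Int) := by
  rw [List.map_cons, PySem.List.min?_id_cons]
  simp only [Option.getD_some]
  rw [List.foldl_cons, min_eq_right (by exact_mod_cast hq)]
  rw [List.foldl_map]
  exact (pvCast_foldl_min key t (key q)).symm

lemma pvMax_nonneg (q : Nat × Nat) (t : List (Nat × Nat)) :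
    ¬ ((q :: t).foldl (fun m p => max m ((p.1 : Nat) : Int)) (-1) < 0) := by
  have h1 := (PySem.List.le_foldl_max ((q :: t).map (fun p => ((p.1 : Nat) : Int))) (-1)).2
  have h2 : ((q :: t).map (fun p => ((p.1 : Nat) : Int))).foldl max (-1)
      = (q :: t).foldl (fun m p => max m ((p.1 : Nat) : Int)) (-1) := List.foldl_map
  have h3 : ((q.1 : Nat) : Int) ∈ (q :: t).map (fun p => ((p.1 : Nat) : Int)) := by simp
  have h4 := h1 _ h3
  rw [h2] at h4
  omega

-- the scatter loop of translate, characterised as a pointwise overwrite of a built grid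
lemma pvScatter (h w : Nat) (val : Nat → Nat → Int) (minR minC : Nat) :
    ∀ (L : List (Nat × Nat)), (∀ p ∈ L, p.1 < h ∧ p.2 < w) → ∀ (f : Nat → Nat → Int),
    L.foldl (fun out p =>
        if val p.1 p.2 = 0 then out
        else
          if 0 ≤ (p.1 : Int) + -(minR : Int) ∧ (p.1 : Int) + -(minR : Int) < (h : Int) ∧
             0 ≤ (p.2 : Int) + -(minC : Int) ∧ (p.2 : Int) + -(minC : Int) < (w : Int) then
            out.modify ((p.1 : Int) + -(minR : Int)).toNat
              (fun row => row.set ((p.2 : Int) + -(minC : Int)).toNat (val p.1 p.2))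
          else out) (pvMk h w f)
      = pvMk h w (fun a b =>
          if (a + minR, b + minC) ∈ L ∧ val (a + minR) (b + minC) ≠ 0
          then val (a + minR) (b + minC) else f a b) := by
  intro L
  induction L with
  | nil =>
    intro _ f
    rw [List.foldl_nil]
    exact (pvMk_congr (fun a _ b _ => by simp)).symm
  | cons p t ih =>
    rcases p with ⟨i, j⟩
    intro hb f
    obtain ⟨hp1, hp2⟩ := hb (i, j) List.mem_cons_self
    have hbt : ∀ q ∈ t, q.1 < h ∧ q.2 < w := fun q hq => hb q (List.mem_cons_of_mem (i, j) hq)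
    rw [List.foldl_cons]
    by_cases hv : val i j = 0
    · rw [if_pos hv, ih hbt f]
      apply pvMk_congr
      intro a _ b _
      by_cases hm : (a + minR, b + minC) ∈ t ∧ val (a + minR) (b + minC) ≠ 0
      · rw [if_pos hm, if_pos ⟨List.mem_cons_of_mem (i, j) hm.1, hm.2⟩]
      · rw [if_neg hm, if_neg]
        rintro ⟨hmem, hnz⟩
        rcases List.mem_cons.mp hmem with hpe | hmt
        · rw [Prod.mk.injEq] at hpe
          exact hnz (by rw [hpe.1, hpe.2]; exact hv)
        · exact hm ⟨hmt, hnz⟩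
    · rw [if_neg hv]
      by_cases hc : 0 ≤ (i : Int) + -(minR : Int) ∧ (i : Int) + -(minR : Int) < (h : Int) ∧
          0 ≤ (j : Int) + -(minC : Int) ∧ (j : Int) + -(minC : Int) < (w : Int)
      · rw [if_pos hc]
        have hr : minR ≤ i := by omega
        have hcle : minC ≤ j := by omega
        have e1 : ((i : Int) + -(minR : Int)).toNat = i - minR := by omega
        have e2 : ((j : Int) + -(minC : Int)).toNat = j - minC := by omega
        rw [e1, e2, pvMk_write (val i j) f, ih hbt]
        apply pvMk_congr
        intro a ha b hbw
        by_cases hm : (a + minR, b + minC) ∈ t ∧ val (a + minR) (b + minC) ≠ 0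
        · rw [if_pos hm, if_pos ⟨List.mem_cons_of_mem (i, j) hm.1, hm.2⟩]
        · rw [if_neg hm]
          by_cases heq : a = i - minR ∧ b = j - minC
          · have e3 : a + minR = i := by omega
            have e4 : b + minC = j := by omega
            rw [if_pos heq, e3, e4, if_pos ⟨List.mem_cons_self, hv⟩]
          · rw [if_neg heq, if_neg]
            rintro ⟨hmem, hnz⟩
            rcases List.mem_cons.mp hmem with hpe | hmt
            · rw [Prod.mk.injEq] at hpe
              exact heq ⟨by omega, by omega⟩
            · exact hm ⟨hmt, hnz⟩
      · rw [if_neg hc, ih hbt f]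
        apply pvMk_congr
        intro a _ b _
        have hnp : ¬ (minR ≤ i ∧ minC ≤ j) := by
          intro hle; exact hc ⟨by omega, by omega, by omega, by omega⟩
        by_cases hm : (a + minR, b + minC) ∈ t ∧ val (a + minR) (b + minC) ≠ 0
        · rw [if_pos hm, if_pos ⟨List.mem_cons_of_mem (i, j) hm.1, hm.2⟩]
        · rw [if_neg hm, if_neg]
          rintro ⟨hmem, hnz⟩
          rcases List.mem_cons.mp hmem with hpe | hmt
          · rw [Prod.mk.injEq] at hpe
            exact hnp ⟨by omega, by omega⟩
          · exact hm ⟨hmt, hnz⟩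

-- translate by (-minR, -minC) is the gather grid
lemma pvTranslate_eq (grid : List (List Int)) (hg : grid ≠ []) (minR minC : Nat) :
    pvTranslate grid (-(minR : Int)) (-(minC : Int))
      = pvMk grid.length (grid.headD []).length (fun a b =>
          if (a + minR, b + minC) ∈ pvPairs grid.length (grid.headD []).length ∧
             (grid.getD (a + minR) []).getD (b + minC) 0 ≠ 0
          then (grid.getD (a + minR) []).getD (b + minC) 0 else 0) := by
  unfold pvTranslate
  rw [if_neg hg]
  refine Eq.trans ?_ (Eq.trans (congrArg
      (fun init => List.foldl (fun (out : List (List Int)) (p : Nat × Nat) =>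
        if (grid.getD p.1 []).getD p.2 0 = 0 then out
        else
          if 0 ≤ (p.1 : Int) + -(minR : Int) ∧ (p.1 : Int) + -(minR : Int) < (grid.length : Int) ∧
             0 ≤ (p.2 : Int) + -(minC : Int) ∧ (p.2 : Int) + -(minC : Int) < ((grid.headD []).length : Int) then
            out.modify ((p.1 : Int) + -(minR : Int)).toNat
              (fun row => row.set ((p.2 : Int) + -(minC : Int)).toNat ((grid.getD p.1 []).getD p.2 0))
          else out) init (pvPairs grid.length (grid.headD []).length))
      (pvMk_zero grid.length (grid.headD []).length))
    (pvScatter grid.length (grid.headD []).length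
      (fun i j => (grid.getD i []).getD j 0) minR minC
      (pvPairs grid.length (grid.headD []).length)
      (fun p hp => by rcases p with ⟨i, j⟩; exact pvMem_pvPairs.mp hp)
      (fun _ _ => 0)))
  exact (pvFold_pairs (σ := List (List Int)) grid.length (grid.headD []).length
      (fun out i j =>
        if (grid.getD i []).getD j 0 = 0 then out
        else
          if 0 ≤ (i : Int) + -(minR : Int) ∧ (i : Int) + -(minR : Int) < (grid.length : Int) ∧
             0 ≤ (j : Int) + -(minC : Int) ∧ (j : Int) + -(minC : Int) < ((grid.headD []).length : Int) then
            out.modify ((i : Int) + -(minR : Int)).toNat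
              (fun row => row.set ((j : Int) + -(minC : Int)).toNat ((grid.getD i []).getD j 0))
          else out)
      (List.replicate grid.length (List.replicate (grid.headD []).length 0)))

-- A, characterised by the cell list
lemma pvA_char (g : List (List Int)) (hg : g ≠ []) :
    move_bbox_to_topleft g =
      if (pvCells g).foldl (fun m p => max m ((p.1 : Nat) : Int)) (-1) < 0 then g
      else pvTranslate g
        (-((pvCells g).foldl (fun m p => min m ((p.1 : Nat) : Int)) ((g.length : Nat) : Int)))
        (-((pvCells g).foldl (fun m p => min m ((p.2 : Nat) : Int)) (((g.headD []).length : Nat) : Int))) := by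
  have hst : (List.range g.length).foldl (fun s i =>
        (List.range (g.headD []).length).foldl (fun s j =>
          if (g.getD i []).getD j 0 ≠ 0 then
            (min s.1 (i : Int), max s.2.1 (i : Int), min s.2.2.1 (j : Int), max s.2.2.2 (j : Int))
          else s) s) ((g.length : Int), (-1 : Int), ((g.headD []).length : Int), (-1 : Int))
      = ((pvCells g).foldl (fun m p => min m ((p.1 : Nat) : Int)) (g.length : Int),
         (pvCells g).foldl (fun m p => max m ((p.1 : Nat) : Int)) (-1),
         (pvCells g).foldl (fun m p => min m ((p.2 : Nat) : Int)) ((g.headD []).length : Int),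
         (pvCells g).foldl (fun m p => max m ((p.2 : Nat) : Int)) (-1)) := by
    refine Eq.trans
      (pvFold_pairs (σ := Int × Int × Int × Int) g.length (g.headD []).length
        (fun s i j =>
          if (g.getD i []).getD j 0 ≠ 0 then
            (min s.1 (i : Int), max s.2.1 (i : Int), min s.2.2.1 (j : Int), max s.2.2.2 (j : Int))
          else s)
        ((g.length : Int), (-1 : Int), ((g.headD []).length : Int), (-1 : Int)))
      (Eq.trans ?_ (pvFold_split (pvCells g) _ _ _ _))
    rw [pvCells, List.foldl_filter]
    simp only [pvNZ, decide_eq_true_eq]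
  unfold move_bbox_to_topleft
  rw [if_neg hg]
  exact congrArg (fun st : Int × Int × Int × Int =>
    if st.2.1 < 0 then g else pvTranslate g (-st.1) (-st.2.2.1)) hst

-- ---- B-side lemmas ----

lemma pvF_lt_iff (w : Nat) (row : List Int) (hw : w ≤ row.length) :
    pvF w row < w ↔ ∃ j < w, row.getD j 0 ≠ 0 := by
  have hlen : (row.take w).length = w := by rw [List.length_take]; omega
  rw [pvF]
  cases hfi : (row.take w).findIdx? (fun v => v != 0) with
  | none =>
    simp only [Option.getD_none, lt_self_iff_false, false_iff]
    rintro ⟨j, hj, hnz⟩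
    have hall := List.findIdx?_eq_none_iff.mp hfi
    have hjmem : row[j] ∈ row.take w := by
      have : (row.take w)[j]'(by omega) = row[j]'(by omega) := List.getElem_take
      rw [← this]; exact List.getElem_mem _
    have := hall _ hjmem
    rw [List.getD_eq_getElem row 0 (by omega)] at hnz
    simp at this
    exact hnz this
  | some k =>
    obtain ⟨hk, hpk, -⟩ := List.findIdx?_eq_some_iff_getElem.mp hfi
    simp only [Option.getD_some]
    constructor
    · intro hlt
      refine ⟨k, by omega, ?_⟩
      rw [List.getElem_take] at hpk
      rw [List.getD_eq_getElem row 0 (by omega)]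
      simpa using hpk
    · intro _; omega

lemma pvF_spec (w : Nat) (row : List Int) (hw : w ≤ row.length) (hlt : pvF w row < w) :
    row.getD (pvF w row) 0 ≠ 0 ∧ ∀ j < pvF w row, row.getD j 0 = 0 := by
  have hlen : (row.take w).length = w := by rw [List.length_take]; omega
  rw [pvF] at hlt ⊢
  cases hfi : (row.take w).findIdx? (fun v => v != 0) with
  | none => rw [hfi] at hlt; simp at hlt
  | some k =>
    obtain ⟨hk, hpk, hmin⟩ := List.findIdx?_eq_some_iff_getElem.mp hfi
    simp only [Option.getD_some]
    constructor
    · rw [List.getElem_take] at hpk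
      rw [List.getD_eq_getElem row 0 (by omega)]
      simpa using hpk
    · intro j hj
      have h2 := hmin j hj
      rw [List.getElem_take] at h2
      rw [List.getD_eq_getElem row 0 (by omega)]
      simpa using h2

lemma pvIdxOf_le {l : List Bool} {i : Nat} (hi : i < l.length) (ht : l[i] = true) :
    l.idxOf true ≤ i := by
  by_contra h
  have he : l.idxOf true = l.findIdx (fun x => true == x) := by simp [List.idxOf]
  have hlt : i < l.findIdx (fun x => true == x) := by omega
  have h2 : l[i] = false := by simpa using List.not_of_lt_findIdx hlt
  rw [ht] at h2
  exact absurd h2 (by simp)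

-- pvF is ≤ the column of any non-zero cell below w
lemma pvF_le_col (w : Nat) (row : List Int) (hw : w ≤ row.length)
    {j : Nat} (hj : j < w) (hnz : row.getD j 0 ≠ 0) : pvF w row ≤ j := by
  by_contra hgt
  have hlt : pvF w row < w := (pvF_lt_iff w row hw).mpr ⟨j, hj, hnz⟩
  have hjlt : j < pvF w row := by omega
  exact hnz ((pvF_spec w row hw hlt).2 j hjlt)

-- pvF of a row < w yields a cell of pvCells
lemma pvF_cell (g : List (List Int)) (hpre : ∀ row ∈ g, (g.headD []).length ≤ row.length)
    {i : Nat} (hi : i < g.length) (hlt : pvF (g.headD []).length (g[i]'hi) < (g.headD []).length) :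
    (i, pvF (g.headD []).length (g[i]'hi)) ∈ pvCells g := by
  have hrw := hpre _ (List.getElem_mem hi)
  have hnz := (pvF_spec _ _ hrw hlt).1
  exact pvMem_pvCells.mpr ⟨⟨hi, hlt⟩, by rw [List.getD_eq_getElem g [] hi]; exact hnz⟩

lemma pvAny_iff (g : List (List Int)) (hpre : ∀ row ∈ g, (g.headD []).length ≤ row.length) :
    ((g.map (pvF (g.headD []).length)).map
        (fun f => decide (f < (g.headD []).length))).any id = true
      ↔ pvCells g ≠ [] := by
  set w := (g.headD []).length with hw
  rw [List.map_map, List.any_map, List.any_eq_true]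
  constructor
  · rintro ⟨row, hrow, hb⟩
    obtain ⟨i, hi, hrowi⟩ := List.getElem_of_mem hrow
    simp only [Function.comp, id, decide_eq_true_eq] at hb
    intro hnil
    have hcell : (i, pvF w g[i]) ∈ pvCells g := pvF_cell g hpre hi (by rw [hrowi]; exact hb)
    rw [hnil] at hcell
    simp at hcell
  · intro hne
    rcases hcq : pvCells g with _ | ⟨⟨i, j⟩, t⟩
    · exact absurd hcq hne
    · have hmem : (i, j) ∈ pvCells g := by rw [hcq]; exact List.mem_cons_self
      obtain ⟨⟨hi, hj⟩, hnz⟩ := pvMem_pvCells.mp hmem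
      refine ⟨g[i], List.getElem_mem hi, ?_⟩
      simp only [Function.comp, id, decide_eq_true_eq]
      have := pvF_le_col w g[i] (hpre _ (List.getElem_mem hi)) hj
        (by rw [List.getD_eq_getElem g [] hi] at hnz; exact hnz)
      omega

lemma pvMinR_eq (g : List (List Int)) (hpre : ∀ row ∈ g, (g.headD []).length ≤ row.length)
    (q : Nat × Nat) (t : List (Nat × Nat)) (hc : pvCells g = q :: t) :
    ((g.map (pvF (g.headD []).length)).map
        (fun f => decide (f < (g.headD []).length))).idxOf true
      = (PySem.List.min? ((q :: t).map Prod.fst) (fun y => y)).getD 0 := by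
  set w := (g.headD []).length with hw
  set l := (g.map (pvF w)).map (fun f => decide (f < w)) with hl
  have hlen : l.length = g.length := by simp [hl]
  have hgetl : ∀ i (hi : i < g.length), l[i]'(by omega) = decide (pvF w (g[i]'hi) < w) := by
    intro i hi; simp [hl]
  obtain ⟨m, hm⟩ : ∃ m, PySem.List.min? ((q :: t).map Prod.fst) (fun y => y) = some m := by
    cases hmm : PySem.List.min? ((q :: t).map Prod.fst) (fun y => y) with
    | none => exact absurd ((PySem.List.min?_eq_none_iff _ _).mp hmm) (by simp)
    | some m => exact ⟨m, rfl⟩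
  rw [hm, Option.getD_some]
  have hmmin : ∀ y ∈ (q :: t).map Prod.fst, m ≤ y := fun y hy => PySem.List.min?_isMin hm y hy
  obtain ⟨⟨pi, pj⟩, hp, hpm⟩ := List.mem_map.mp (PySem.List.min?_mem hm)
  simp only at hpm
  subst hpm
  rw [← hc] at hp
  obtain ⟨⟨hpi, hpj⟩, hpnz⟩ := pvMem_pvCells.mp hp
  have hlm : l[pi]'(by omega) = true := by
    rw [hgetl pi hpi]
    simp only [decide_eq_true_eq]
    have := pvF_le_col w (g[pi]'hpi) (hpre _ (List.getElem_mem hpi)) hpj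
      (by rw [List.getD_eq_getElem g [] hpi] at hpnz; exact hpnz)
    omega
  refine Nat.le_antisymm (pvIdxOf_le (by omega) hlm) ?_
  have hidx : l.idxOf true < l.length := List.idxOf_lt_length_iff.mpr (List.mem_of_getElem hlm)
  set r := l.idxOf true with hr
  have hlr : l[r]'hidx = true := List.getElem_idxOf hidx
  have hrh : r < g.length := by omega
  rw [hgetl r hrh] at hlr
  simp only [decide_eq_true_eq] at hlr
  have hcell := pvF_cell g hpre hrh (by exact hlr)
  rw [hc] at hcell
  exact hmmin r (List.mem_map.mpr ⟨(r, pvF (g.headD []).length (g[r]'hrh)), hcell, rfl⟩)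

lemma pvMinC_eq (g : List (List Int)) (hpre : ∀ row ∈ g, (g.headD []).length ≤ row.length)
    (q : Nat × Nat) (t : List (Nat × Nat)) (hc : pvCells g = q :: t) :
    (PySem.List.min? (g.map (pvF (g.headD []).length)) (fun y => y)).getD 0
      = (PySem.List.min? ((q :: t).map Prod.snd) (fun y => y)).getD 0 := by
  set w := (g.headD []).length with hw
  obtain ⟨m, hm⟩ : ∃ m, PySem.List.min? ((q :: t).map Prod.snd) (fun y => y) = some m := by
    cases hmm : PySem.List.min? ((q :: t).map Prod.snd) (fun y => y) with
    | none => exact absurd ((PySem.List.min?_eq_none_iff _ _).mp hmm) (by simp)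
    | some m => exact ⟨m, rfl⟩
  have hgne : g ≠ [] := by
    intro hgnil
    have h0 : pvCells g = [] := by rw [pvCells, hgnil]; rfl
    rw [hc] at h0; exact absurd h0 (by simp)
  obtain ⟨m', hm'⟩ : ∃ m', PySem.List.min? (g.map (pvF w)) (fun y => y) = some m' := by
    cases hmm : PySem.List.min? (g.map (pvF w)) (fun y => y) with
    | none => exact absurd (List.map_eq_nil_iff.mp ((PySem.List.min?_eq_none_iff _ _).mp hmm)) hgne
    | some m' => exact ⟨m', rfl⟩
  rw [hm, hm', Option.getD_some, Option.getD_some]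
  have hmmin : ∀ y ∈ (q :: t).map Prod.snd, m ≤ y := fun y hy => PySem.List.min?_isMin hm y hy
  have hm'min : ∀ y ∈ g.map (pvF w), m' ≤ y := fun y hy => PySem.List.min?_isMin hm' y hy
  obtain ⟨⟨pi, pj⟩, hp, hpm⟩ := List.mem_map.mp (PySem.List.min?_mem hm)
  simp only at hpm
  subst hpm
  rw [← hc] at hp
  obtain ⟨⟨hpi, hpj⟩, hpnz⟩ := pvMem_pvCells.mp hp
  obtain ⟨row0, hrow0, hr0⟩ := List.mem_map.mp (PySem.List.min?_mem hm')
  obtain ⟨i0, hi0, hrow0i⟩ := List.getElem_of_mem hrow0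
  subst hrow0i
  have hF1 : pvF w (g[pi]'hpi) ≤ pj := pvF_le_col w (g[pi]'hpi)
    (hpre _ (List.getElem_mem hpi)) hpj
    (by rw [List.getD_eq_getElem g [] hpi] at hpnz; exact hpnz)
  have hFrow : pvF w (g[pi]'hpi) ∈ g.map (pvF w) :=
    List.mem_map.mpr ⟨g[pi]'hpi, List.getElem_mem hpi, rfl⟩
  apply Nat.le_antisymm
  · -- m' ≤ m = pj
    have := hm'min _ hFrow
    omega
  · -- m = pj ≤ m'
    have hm'lt : m' < w := by
      have := hm'min _ hFrow
      omega
    rw [← hr0] at hm'lt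
    have hcell := pvF_cell g hpre hi0 (by exact hm'lt)
    rw [hc] at hcell
    have h3 : pj ≤ pvF w g[i0] := hmmin _ (List.mem_map.mpr ⟨_, hcell, rfl⟩)
    have h4 : pvF w g[i0] = m' := hr0
    omega

lemma pvAssemble (g : List (List Int)) (hpre : ∀ row ∈ g, (g.headD []).length ≤ row.length)
    (r c : Nat) (hr : r ≤ g.length) (hcw : c ≤ (g.headD []).length) :
    ((g.map (fun row => row.take (g.headD []).length)).drop r).map
        (fun win => win.drop c ++ List.replicate c (0 : Int))
      ++ List.replicate r (List.replicate (g.headD []).length (0 : Int))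
      = pvMk g.length (g.headD []).length (fun a b =>
          if a + r < g.length ∧ b + c < (g.headD []).length
          then (g.getD (a + r) []).getD (b + c) 0 else 0) := by
  set w := (g.headD []).length with hw
  apply List.ext_getElem
  · simp [pvMk]; omega
  · intro a ha1 ha2
    have hah : a < g.length := by
      simp only [pvMk, List.length_map, List.length_range] at ha2; exact ha2
    simp only [pvMk, List.getElem_map, List.getElem_range]
    by_cases hcase : a < g.length - r
    · rw [List.getElem_append_left (by simp; omega)]
      rw [List.getElem_map, List.getElem_drop, List.getElem_map]
      have har : r + a < g.length := by omega
      have hrowlen : w ≤ (g[r + a]'har).length := hpre _ (List.getElem_mem har)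
      have hwinlen : ((g[r + a]'har).take w).length = w := by rw [List.length_take]; omega
      apply List.ext_getElem
      · simp [hwinlen]; omega
      · intro b hb1 hb2
        have hbw : b < w := by simp only [List.length_map, List.length_range] at hb2; exact hb2
        simp only [List.getElem_map, List.getElem_range]
        by_cases hbc : b < w - c
        · rw [List.getElem_append_left (by rw [List.length_drop, hwinlen]; omega)]
          rw [List.getElem_drop, List.getElem_take]
          rw [if_pos ⟨by omega, by omega⟩]
          have hgd : g.getD (a + r) [] = g[r + a]'har := by
            rw [List.getD_eq_getElem g [] (show a + r < g.length by omega)]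
            exact getElem_congr rfl (by omega) (by omega)
          rw [hgd, List.getD_eq_getElem _ 0 (by omega)]
          exact getElem_congr rfl (by omega) (by omega)
        · rw [List.getElem_append_right (by rw [List.length_drop, hwinlen]; omega)]
          rw [List.getElem_replicate]
          rw [if_neg (by omega)]
    · rw [List.getElem_append_right (by simp; omega)]
      rw [List.getElem_replicate]
      apply List.ext_getElem
      · simp
      · intro b hb1 hb2
        simp only [List.getElem_replicate, List.getElem_map, List.getElem_range]
        rw [if_neg (by omega)]


-- B's firsts list, indexed
lemma pvFirsts_eq (g : List (List Int)) :
    (g.map (fun row => row.take (g.headD []).length)).map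
        (fun win => (win.findIdx? (fun v => v != 0)).getD (g.headD []).length)
      = g.map (pvF (g.headD []).length) := by
  rw [List.map_map]
  rfl

-- B, characterised by the cell list (under Pre)
lemma pvB_char (g : List (List Int)) (hg : g ≠ [])
    (hpre : ∀ row ∈ g, (g.headD []).length ≤ row.length) :
    move_bbox_to_topleft_alt g =
      if pvCells g = [] then g
      else pvMk g.length (g.headD []).length (fun a b =>
        if a + (PySem.List.min? ((pvCells g).map Prod.fst) (fun y => y)).getD 0 < g.length ∧
           b + (PySem.List.min? ((pvCells g).map Prod.snd) (fun y => y)).getD 0 < (g.headD []).length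
        then (g.getD (a + (PySem.List.min? ((pvCells g).map Prod.fst) (fun y => y)).getD 0) []).getD
               (b + (PySem.List.min? ((pvCells g).map Prod.snd) (fun y => y)).getD 0) 0
        else 0) := by
  set w := (g.headD []).length with hw
  unfold move_bbox_to_topleft_alt
  rw [if_neg hg]
  simp only []
  rw [pvFirsts_eq g]
  rcases hcq : pvCells g with _ | ⟨q, t⟩
  · -- no non-zero cell: the any-test is false and B returns g
    have hanyf : ((g.map (pvF w)).map (fun f => decide (f < w))).any id = false := by
      rw [← Bool.not_eq_true]
      intro hany
      exact absurd hcq ((pvAny_iff g hpre).mp hany)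
    rw [hanyf]
    simp
  · -- non-empty: the any-test is true
    have hany : ((g.map (pvF w)).map (fun f => decide (f < w))).any id = true :=
      (pvAny_iff g hpre).mpr (by rw [hcq]; simp)
    rw [if_neg (by rw [hany]; simp)]
    rw [if_neg (show ¬ (q :: t = []) by simp)]
    have hq : q.1 < g.length ∧ q.2 < w := by
      have hqm : q ∈ pvCells g := by rw [hcq]; exact List.mem_cons_self
      rcases q with ⟨q1, q2⟩
      exact (pvMem_pvCells.mp hqm).1
    rw [pvMinR_eq g hpre q t hcq, pvMinC_eq g hpre q t hcq]
    -- bounds for pvAssemble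
    have hrle : (PySem.List.min? ((q :: t).map Prod.fst) (fun y => y)).getD 0 ≤ g.length := by
      obtain ⟨m, hm⟩ : ∃ m, PySem.List.min? ((q :: t).map Prod.fst) (fun y => y) = some m := by
        cases hmm : PySem.List.min? ((q :: t).map Prod.fst) (fun y => y) with
        | none => exact absurd ((PySem.List.min?_eq_none_iff _ _).mp hmm) (by simp)
        | some m => exact ⟨m, rfl⟩
      rw [hm, Option.getD_some]
      have := PySem.List.min?_isMin hm q.1 (by simp)
      omega
    have hcle : (PySem.List.min? ((q :: t).map Prod.snd) (fun y => y)).getD 0 ≤ w := by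
      obtain ⟨m, hm⟩ : ∃ m, PySem.List.min? ((q :: t).map Prod.snd) (fun y => y) = some m := by
        cases hmm : PySem.List.min? ((q :: t).map Prod.snd) (fun y => y) with
        | none => exact absurd ((PySem.List.min?_eq_none_iff _ _).mp hmm) (by simp)
        | some m => exact ⟨m, rfl⟩
      rw [hm, Option.getD_some]
      have := PySem.List.min?_isMin hm q.2 (by simp)
      omega
    exact pvAssemble g hpre _ _ hrle hcle

-- ===== VERDICT (by name: the statement is the Claim_ definition above) =====
theorem move_bbox_to_topleft_spec : Claim_equal_move_bbox_to_topleft := by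
  intro grid _ hpre
  unfold Spec_move_bbox_to_topleft
  by_cases hg : grid = []
  · simp [move_bbox_to_topleft, move_bbox_to_topleft_alt, hg]
  · rw [pvA_char grid hg, pvB_char grid hg hpre]
    rcases hc : pvCells grid with _ | ⟨q, t⟩
    · simp
    · have hq : q.1 < grid.length ∧ q.2 < (grid.headD []).length := by
        have hqm : q ∈ pvCells grid := by rw [hc]; exact List.mem_cons_self
        rcases q with ⟨q1, q2⟩
        exact (pvMem_pvCells.mp hqm).1
      rw [if_neg (pvMax_nonneg q t), if_neg (by simp)]
      rw [pvMin_fold Prod.fst q t grid.length (le_of_lt hq.1),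
          pvMin_fold Prod.snd q t (grid.headD []).length (le_of_lt hq.2)]
      rw [pvTranslate_eq grid hg _ _]
      apply pvMk_congr
      intro a ha b hb
      by_cases hbnd : a + (PySem.List.min? ((q :: t).map Prod.fst) (fun y => y)).getD 0 < grid.length ∧
          b + (PySem.List.min? ((q :: t).map Prod.snd) (fun y => y)).getD 0 < (grid.headD []).length
      · rw [if_pos hbnd]
        by_cases hz : (grid.getD (a + (PySem.List.min? ((q :: t).map Prod.fst) (fun y => y)).getD 0) []).getD
            (b + (PySem.List.min? ((q :: t).map Prod.snd) (fun y => y)).getD 0) 0 = 0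
        · rw [if_neg (by rintro ⟨_, hnz⟩; exact hnz hz), hz]
        · rw [if_pos ⟨pvMem_pvPairs.mpr hbnd, hz⟩]
      · rw [if_neg hbnd, if_neg (by rintro ⟨hmem, _⟩; exact hbnd (pvMem_pvPairs.mp hmem))]
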